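-- pv_equiv track=rewrite | github.com/emtreila/FP | practice-exam/1st_exam-practice/code_games/code_games.py | codes_runners
-- ===== SOURCE A (Python) =====
-- def codes_runners(list_user,list_nr):
--     c=0
--     r=0
--     for i in range(len(list_nr)):
--         for j in range(len(list_user)):
--             if list_nr[i] == list_user[j]:
--                 if i == j:
--                     c +=1
--                 else:
--                     r +=1
--     return c,r
-- ===== SOURCE B (Python) =====
-- def codes_runners(list_user, list_nr):
--     # count occurrences of each code the users typed, once
--     cu = {}
--     for v in list_user:
--         cu[v] = cu.get(v, 0) + 1
--     # total number of matching (i, j) pairs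
--     total = 0
--     for v in list_nr:
--         total += cu.get(v, 0)
--     # positional matches (the diagonal)
--     c = 0
--     for x, y in zip(list_nr, list_user):
--         if x == y:
--             c += 1
--     return c, total - c
-- ===== Notes on version B (the rewrite author's own statement) =====
-- stated objective: faster
-- what changed: Replaces the O(n*m) nested index loops by a counting dict over list_user (total matching pairs = sum of counts over list_nr) plus a single zip pass for positional matches; r = total - c.
import Mathlib
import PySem

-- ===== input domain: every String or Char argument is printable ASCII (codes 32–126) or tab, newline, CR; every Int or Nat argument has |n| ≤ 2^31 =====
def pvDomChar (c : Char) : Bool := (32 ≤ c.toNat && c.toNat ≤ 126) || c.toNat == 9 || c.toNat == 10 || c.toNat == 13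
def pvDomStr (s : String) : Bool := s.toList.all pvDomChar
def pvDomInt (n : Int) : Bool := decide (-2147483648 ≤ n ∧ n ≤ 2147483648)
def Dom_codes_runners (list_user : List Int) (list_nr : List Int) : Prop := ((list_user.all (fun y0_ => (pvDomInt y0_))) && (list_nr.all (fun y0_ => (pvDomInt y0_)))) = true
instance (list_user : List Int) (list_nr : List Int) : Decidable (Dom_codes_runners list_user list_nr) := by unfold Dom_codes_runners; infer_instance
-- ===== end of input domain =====

-- B replaces A's nested index loops by a counting dict over list_user plus one zip pass (objective: faster).

-- ===== PORT A =====
def codes_runners (list_user : List Int) (list_nr : List Int) : Int × Int :=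
  ((PySem.List.pyRange 0 (list_nr.length : Int) 1).foldl (fun (cr : Int × Int) i =>
    (PySem.List.pyRange 0 (list_user.length : Int) 1).foldl (fun (cr : Int × Int) j =>
      if PySem.List.pyGetD list_nr i 0 = PySem.List.pyGetD list_user j 0 then
        if i = j then (cr.1 + 1, cr.2) else (cr.1, cr.2 + 1)
      else cr) cr) ((0 : Int), (0 : Int)))

-- ===== PORT B =====
def codes_runners_alt (list_user : List Int) (list_nr : List Int) : Int × Int :=
  let cu : PySem.Dict Int Int :=
    list_user.foldl (fun d v => d.insert v (d.getD v 0 + 1)) PySem.Dict.empty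
  let total : Int := list_nr.foldl (fun acc v => acc + cu.getD v 0) 0
  let c : Int := (list_nr.zip list_user).foldl
    (fun acc p => if p.1 = p.2 then acc + 1 else acc) 0
  (c, total - c)

-- ===== PRECONDITION & SPEC =====
def Spec_codes_runners (list_user : List Int) (list_nr : List Int) (out : Int × Int) : Prop := out = codes_runners_alt list_user list_nr
instance (list_user : List Int) (list_nr : List Int) (out : Int × Int) : Decidable (Spec_codes_runners list_user list_nr out) := by unfold Spec_codes_runners; infer_instance

-- ===== CLAIM (what is proved, stated in full; the proofs are below) =====
def Claim_equal_codes_runners : Prop := ∀ (list_user : List Int) (list_nr : List Int), Dom_codes_runners list_user list_nr → Spec_codes_runners list_user list_nr (codes_runners list_user list_nr)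

-- ===== LEMMAS AND PROOFS =====

-- number of positional matches (the diagonal)
def pvZ (list_user list_nr : List Int) : Int :=
  (((list_nr.zip list_user).countP (fun p => decide (p.1 = p.2))) : Int)

-- total number of matching (i, j) pairs
def pvS (list_user list_nr : List Int) : Int :=
  (list_nr.map (fun v => (list_user.count v : Int))).sum

-- zip with a single appended element on the left
theorem pv_zip_concat (a : Int) : ∀ (xs ys : List Int),
    (xs ++ [a]).zip ys =
      xs.zip ys ++ (if h : xs.length < ys.length then [(a, ys[xs.length])] else []) := by
  intro xs
  induction xs with
  | nil =>
    intro ys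
    cases ys with
    | nil => simp
    | cons b t => simp
  | cons x xs ih =>
    intro ys
    cases ys with
    | nil => simp
    | cons b t =>
      simp only [List.cons_append, List.zip_cons_cons, ih t, List.length_cons]
      by_cases h : xs.length < t.length
      · simp [h]
      · simp [h]

-- pyGetD agrees on the left part of an append, for in-range nonnegative indices
theorem pv_pyGetD_append_left (xs : List Int) (y : Int) (j : Int)
    (h0 : 0 ≤ j) (hj : j < (xs.length : Int)) :
    PySem.List.pyGetD (xs ++ [y]) j 0 = PySem.List.pyGetD xs j 0 := by
  lift j to ℕ using h0
  have hj' : j < xs.length := by exact_mod_cast hj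
  rw [PySem.List.pyGetD_natCast, PySem.List.pyGetD_natCast]
  simp [List.getD, List.getElem?_append_left, hj']

theorem pv_pyGetD_append_self (xs : List Int) (y : Int) :
    PySem.List.pyGetD (xs ++ [y]) (xs.length : Int) 0 = y := by
  rw [PySem.List.pyGetD_natCast]
  simp [List.getD]

-- inner loop of A: one pass of j over range(len(list_user)), for a fixed value x at row i
theorem pv_inner (x i : Int) (hi : 0 ≤ i) : ∀ (lu : List Int) (c r : Int),
    (PySem.List.pyRange 0 (lu.length : Int) 1).foldl (fun (cr : Int × Int) j =>
      if x = PySem.List.pyGetD lu j 0 then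
        if i = j then (cr.1 + 1, cr.2) else (cr.1, cr.2 + 1)
      else cr) (c, r)
    = (c + (if i < (lu.length : Int) ∧ x = PySem.List.pyGetD lu i 0 then 1 else 0),
       r + (lu.count x : Int)
         - (if i < (lu.length : Int) ∧ x = PySem.List.pyGetD lu i 0 then 1 else 0)) := by
  intro lu
  induction lu using List.reverseRecOn with
  | nil =>
    intro c r
    have hneg : ¬ (i < (0 : Int)) := by omega
    rw [show ((([] : List Int).length : Int)) = 0 by simp,
      PySem.List.pyRange_one_eq_nil le_rfl]
    simp [hneg]
  | append_singleton lu y ih =>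
    intro c r
    have hlen : ((lu ++ [y]).length : Int) = (lu.length : Int) + 1 := by
      simp
    have hsplit : PySem.List.pyRange 0 ((lu ++ [y]).length : Int) 1
        = PySem.List.pyRange 0 (lu.length : Int) 1 ++ [(lu.length : Int)] := by
      rw [hlen, PySem.List.pyRange_one_succ_right (by positivity)]
    rw [hsplit, List.foldl_append]
    have hcongr : (PySem.List.pyRange 0 (lu.length : Int) 1).foldl
        (fun (cr : Int × Int) j =>
          if x = PySem.List.pyGetD (lu ++ [y]) j 0 then
            if i = j then (cr.1 + 1, cr.2) else (cr.1, cr.2 + 1)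
          else cr) (c, r)
        = (PySem.List.pyRange 0 (lu.length : Int) 1).foldl
        (fun (cr : Int × Int) j =>
          if x = PySem.List.pyGetD lu j 0 then
            if i = j then (cr.1 + 1, cr.2) else (cr.1, cr.2 + 1)
          else cr) (c, r) := by
      apply PySem.List.foldl_congr_mem
      intro acc j hj
      rcases (PySem.List.mem_pyRange_one).1 hj with ⟨hj0, hj1⟩
      rw [pv_pyGetD_append_left lu y j hj0 hj1]
    rw [hcongr, ih]
    simp only [List.foldl_cons, List.foldl_nil]
    rw [pv_pyGetD_append_self lu y, hlen]
    have hcnt : (((lu ++ [y]).count x : Nat) : Int)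
        = ((lu.count x : Nat) : Int) + (if x = y then 1 else 0) := by
      rw [List.count_append]
      by_cases hxy : x = y
      · simp [hxy]
      · simp [List.count_singleton, Ne.symm hxy, hxy]
    rw [hcnt]
    by_cases hil : i < (lu.length : Int)
    · have hi1 : i < (lu.length : Int) + 1 := by omega
      have hne : i ≠ (lu.length : Int) := by omega
      rw [pv_pyGetD_append_left lu y i hi hil]
      by_cases hxy : x = y
      · by_cases hd : x = PySem.List.pyGetD lu i 0 <;>
          · try simp [hd, hne, hil, hi1, hxy]
            try first
              | omega
              | (split_ifs <;> omega)
              | (split_ifs <;> (try simp [Prod.ext_iff]) <;> (try omega))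
              | (simp only [Prod.mk.injEq]; omega)
      · by_cases hd : x = PySem.List.pyGetD lu i 0 <;>
          · try simp [hd, hne, hil, hi1, hxy]
            try first
              | omega
              | (split_ifs <;> omega)
              | (split_ifs <;> (try simp [Prod.ext_iff]) <;> (try omega))
              | (simp only [Prod.mk.injEq]; omega)
    · by_cases hie : i = (lu.length : Int)
      · have hi1 : i < (lu.length : Int) + 1 := by omega
        have hgi : PySem.List.pyGetD (lu ++ [y]) i 0 = y := by
          rw [hie]; exact pv_pyGetD_append_self lu y
        by_cases hxy : x = y <;>
          · try simp [hie, hil, hi1, hgi, hxy]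
            try first
              | omega
              | (split_ifs <;> omega)
              | (split_ifs <;> (try simp [Prod.ext_iff]) <;> (try omega))
              | (simp only [Prod.mk.injEq]; omega)
      · have hi1 : ¬ i < (lu.length : Int) + 1 := by omega
        by_cases hxy : x = y <;>
          · try simp [hil, hie, hi1, hxy]
            try first
              | omega
              | (split_ifs <;> omega)
              | (split_ifs <;> (try simp [Prod.ext_iff]) <;> (try omega))
              | (simp only [Prod.mk.injEq]; omega)

-- outer loop of A
theorem pv_outer (lu : List Int) : ∀ (ln : List Int) (c r : Int),
    (PySem.List.pyRange 0 (ln.length : Int) 1).foldl (fun (cr : Int × Int) i =>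
      (PySem.List.pyRange 0 (lu.length : Int) 1).foldl (fun (cr : Int × Int) j =>
        if PySem.List.pyGetD ln i 0 = PySem.List.pyGetD lu j 0 then
          if i = j then (cr.1 + 1, cr.2) else (cr.1, cr.2 + 1)
        else cr) cr) (c, r)
    = (c + pvZ lu ln, r + pvS lu ln - pvZ lu ln) := by
  intro ln
  induction ln using List.reverseRecOn with
  | nil =>
    intro c r
    rw [show ((([] : List Int).length : Int)) = 0 by simp,
      PySem.List.pyRange_one_eq_nil le_rfl]
    simp [pvZ, pvS]
  | append_singleton ln y ih =>
    intro c r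
    have hlen : ((ln ++ [y]).length : Int) = (ln.length : Int) + 1 := by simp
    have hsplit : PySem.List.pyRange 0 ((ln ++ [y]).length : Int) 1
        = PySem.List.pyRange 0 (ln.length : Int) 1 ++ [(ln.length : Int)] := by
      rw [hlen, PySem.List.pyRange_one_succ_right (by positivity)]
    rw [hsplit, List.foldl_append]
    have hcongr : ∀ (s : Int × Int), (PySem.List.pyRange 0 (ln.length : Int) 1).foldl
        (fun (cr : Int × Int) i =>
          (PySem.List.pyRange 0 (lu.length : Int) 1).foldl (fun (cr : Int × Int) j =>
            if PySem.List.pyGetD (ln ++ [y]) i 0 = PySem.List.pyGetD lu j 0 then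
              if i = j then (cr.1 + 1, cr.2) else (cr.1, cr.2 + 1)
            else cr) cr) s
        = (PySem.List.pyRange 0 (ln.length : Int) 1).foldl
        (fun (cr : Int × Int) i =>
          (PySem.List.pyRange 0 (lu.length : Int) 1).foldl (fun (cr : Int × Int) j =>
            if PySem.List.pyGetD ln i 0 = PySem.List.pyGetD lu j 0 then
              if i = j then (cr.1 + 1, cr.2) else (cr.1, cr.2 + 1)
            else cr) cr) s := by
      intro s
      apply PySem.List.foldl_congr_mem
      intro acc i hi
      rcases (PySem.List.mem_pyRange_one).1 hi with ⟨hi0, hi1⟩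
      rw [pv_pyGetD_append_left ln y i hi0 hi1]
    rw [hcongr, ih]
    simp only [List.foldl_cons, List.foldl_nil]
    rw [pv_pyGetD_append_self ln y,
      pv_inner y (ln.length : Int) (by positivity) lu]
    -- bookkeeping: pvZ / pvS over ln ++ [y]
    have hZ : pvZ lu (ln ++ [y]) = pvZ lu ln +
        (if (ln.length : Int) < (lu.length : Int) ∧
            y = PySem.List.pyGetD lu (ln.length : Int) 0 then 1 else 0) := by
      unfold pvZ
      rw [pv_zip_concat y ln lu]
      by_cases h : ln.length < lu.length
      · have hcast : ((ln.length : Int) < (lu.length : Int)) := by exact_mod_cast h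
        have hget : PySem.List.pyGetD lu ((ln.length : Nat) : Int) 0 = lu[ln.length] := by
          rw [PySem.List.pyGetD_natCast]
          simp [List.getD, List.getElem?_eq_getElem h]
        rw [dif_pos h, List.countP_append]
        by_cases hy : y = lu[ln.length]
        · simp [hy, hcast, hget]
        · simp [hy, hcast, hget]
      · have hcast : ¬ ((ln.length : Int) < (lu.length : Int)) := by exact_mod_cast h
        rw [dif_neg h]
        simp [hcast]
    have hS : pvS lu (ln ++ [y]) = pvS lu ln + (lu.count y : Int) := by
      unfold pvS
      simp
    rw [hZ, hS]
    simp only [Prod.mk.injEq]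
    constructor <;> ring
-- B unfolded to the same closed form
theorem pv_alt_eq (lu ln : List Int) :
    codes_runners_alt lu ln = (pvZ lu ln, pvS lu ln - pvZ lu ln) := by
  have htotal : ln.foldl (fun acc v => acc + (PySem.Dict.counter lu).getD v 0) 0
      = pvS lu ln := by
    rw [PySem.List.foldl_add]
    simp [pvS, PySem.Dict.getD_counter]
  have hstep : ∀ (acc : Int) (p : Int × Int),
      (if p.1 = p.2 then acc + 1 else acc) = acc + (if p.1 = p.2 then (1 : Int) else 0) := by
    intro acc p
    split_ifs <;> ring
  have hc : (ln.zip lu).foldl (fun (acc : Int) p => if p.1 = p.2 then acc + 1 else acc) 0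
      = pvZ lu ln := by
    rw [PySem.List.foldl_congr_mem (ln.zip lu)
      (fun (acc : Int) p => if p.1 = p.2 then acc + 1 else acc)
      (fun (acc : Int) p => acc + (if p.1 = p.2 then (1 : Int) else 0)) 0
      (fun acc p _ => hstep acc p)]
    rw [PySem.List.foldl_add]
    have := PySem.List.sum_map_ite_one_zero (fun (p : Int × Int) => decide (p.1 = p.2)) (ln.zip lu)
    simp only [decide_eq_true_eq] at this
    rw [this]
    simp [pvZ]
  show ((ln.zip lu).foldl (fun (acc : Int) p => if p.1 = p.2 then acc + 1 else acc) 0,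
      ln.foldl (fun acc v =>
        acc + (lu.foldl (fun d v => d.insert v (d.getD v 0 + 1)) PySem.Dict.empty).getD v 0) 0
      - (ln.zip lu).foldl (fun (acc : Int) p => if p.1 = p.2 then acc + 1 else acc) 0)
    = (pvZ lu ln, pvS lu ln - pvZ lu ln)
  rw [PySem.Dict.foldl_insert_getD_add_one_eq_counter, htotal, hc]

-- ===== VERDICT (by name: the statement is the Claim_ definition above) =====
theorem codes_runners_spec : Claim_equal_codes_runners := by
  intro list_user list_nr _
  unfold Spec_codes_runners
  rw [pv_alt_eq]
  unfold codes_runners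
  rw [pv_outer list_user list_nr 0 0]
  simp
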